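-- pv_equiv track=rewrite | github.com/karteekpv77/English-Dutch-Language-Classifier | code/Decision.py | check_feature_sixth
-- ===== SOURCE A (Python) =====
-- def check_feature_sixth(words):
--     dutch_compound_vowels = ['ae', 'ei', 'au', 'ai', 'eu', 'ie', 'oe', 'ou', 'ui']
--     for word in words:
--         word = word.lower()
--         for compound_vowel in dutch_compound_vowels:
--             if compound_vowel in word:
--                 return "True"
--     return "False"
-- ===== SOURCE B (Python) =====
-- _PAIRS = frozenset([('a', 'e'), ('e', 'i'), ('a', 'u'), ('a', 'i'), ('e', 'u'),
--                     ('i', 'e'), ('o', 'e'), ('o', 'u'), ('u', 'i')])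
--
--
-- def check_feature_sixth(words):
--     for word in words:
--         w = word.lower()
--         for bigram in zip(w, w[1:]):
--             if bigram in _PAIRS:
--                 return "True"
--     return "False"
-- ===== Notes on version B (the rewrite author's own statement) =====
-- stated objective: alternative
-- what changed: Inverts the traversal: instead of substring-searching each of the 9 vowel pairs against the whole word, B makes one pass over the word's adjacent character bigrams and tests each against a frozenset of pairs.
import Mathlib
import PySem

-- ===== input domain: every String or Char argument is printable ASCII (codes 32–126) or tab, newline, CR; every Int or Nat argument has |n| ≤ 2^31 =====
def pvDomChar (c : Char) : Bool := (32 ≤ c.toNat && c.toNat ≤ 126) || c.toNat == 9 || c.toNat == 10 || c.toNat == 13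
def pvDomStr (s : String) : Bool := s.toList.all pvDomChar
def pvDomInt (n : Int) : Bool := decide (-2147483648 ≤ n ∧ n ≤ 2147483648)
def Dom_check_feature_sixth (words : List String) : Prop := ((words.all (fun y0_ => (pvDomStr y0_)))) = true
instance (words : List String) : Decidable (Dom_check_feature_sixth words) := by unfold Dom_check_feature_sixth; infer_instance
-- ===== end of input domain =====

-- B replaces A's 'search each of 9 two-char patterns as a substring of the word' by one pass
-- over the word's adjacent character bigrams tested against a set of pairs (alternative traversal).

-- ===== PORT A =====
-- the literal list of compound vowels from A
def pvVowelStrs : List String := ["ae", "ei", "au", "ai", "eu", "ie", "oe", "ou", "ui"]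

def check_feature_sixth : List String → String
  | [] => "False"
  | word :: rest =>
    let w := PySem.Str.lower word
    -- inner 'for compound_vowel in …: if compound_vowel in word: return "True"'
    if pvVowelStrs.any (fun cv => PySem.Str.isIn cv w) then "True"
    else check_feature_sixth rest

-- ===== PORT B =====
-- the frozenset of character pairs from Source B
def pvVowelPairs : PySem.Set (Char × Char) :=
  PySem.Set.ofList [('a', 'e'), ('e', 'i'), ('a', 'u'), ('a', 'i'), ('e', 'u'),
                    ('i', 'e'), ('o', 'e'), ('o', 'u'), ('u', 'i')]

def check_feature_sixth_alt : List String → String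
  | [] => "False"
  | word :: rest =>
    let cs := PySem.Chars.lower word.toList
    -- 'for bigram in zip(w, w[1:]): if bigram in _PAIRS: return "True"'
    if (cs.zip cs.tail).any (fun ab => PySem.Set.contains pvVowelPairs ab) then "True"
    else check_feature_sixth_alt rest

-- ===== PRECONDITION & SPEC =====
def Spec_check_feature_sixth (words : List String) (out : String) : Prop := out = check_feature_sixth_alt words
instance (words : List String) (out : String) : Decidable (Spec_check_feature_sixth words out) := by unfold Spec_check_feature_sixth; infer_instance

-- ===== CLAIM (what is proved, stated in full; the proofs are below) =====
def Claim_equal_check_feature_sixth : Prop := ∀ (words : List String), Dom_check_feature_sixth words → Spec_check_feature_sixth words (check_feature_sixth words)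

-- ===== LEMMAS AND PROOFS =====

-- a two-character pattern is an infix of cs iff it occurs among the adjacent bigrams of cs
theorem pair_infix_iff_mem_zip (x y : Char) (cs : List Char) :
    [x, y] <:+: cs ↔ (x, y) ∈ cs.zip cs.tail := by
  induction cs with
  | nil => simp
  | cons a t ih =>
    cases t with
    | nil => simp [List.infix_cons_iff]
    | cons b r =>
      rw [List.infix_cons_iff]
      constructor
      · rintro (hp | hi)
        · rcases hp with ⟨s, hs⟩
          simp at hs
          simp [hs.1, hs.2.1]
        · simp only [List.tail_cons] at ih ⊢
          exact List.mem_cons_of_mem _ (ih.mp hi)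
      · intro h
        rcases List.mem_cons.mp h with h | h
        · left
          obtain ⟨hx, hy⟩ : x = a ∧ y = b := by
            simpa using h
          exact ⟨r, by simp [hx, hy]⟩
        · right
          simp only [List.tail_cons] at ih
          exact ih.mpr h

theorem word_eq (cs : List Char) :
    pvVowelStrs.any (fun cv => PySem.Chars.isIn cv.toList cs)
      = (cs.zip cs.tail).any (fun ab => PySem.Set.contains pvVowelPairs ab) := by
  have hz : ∀ x y : Char, (PySem.Chars.isIn [x, y] cs = true) ↔ (x, y) ∈ cs.zip cs.tail := by
    intro x y
    rw [PySem.Chars.isIn_iff_infix]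
    exact pair_infix_iff_mem_zip x y cs
  have hset : pvVowelPairs = [('a', 'e'), ('e', 'i'), ('a', 'u'), ('a', 'i'), ('e', 'u'),
      ('i', 'e'), ('o', 'e'), ('o', 'u'), ('u', 'i')] := by decide
  rw [Bool.eq_iff_iff]
  simp only [pvVowelStrs, hset, List.any_cons, List.any_nil, Bool.or_eq_true,
    List.any_eq_true, PySem.Set.contains,
    show ("ae":String).toList = ['a','e'] from rfl, show ("ei":String).toList = ['e','i'] from rfl,
    show ("au":String).toList = ['a','u'] from rfl, show ("ai":String).toList = ['a','i'] from rfl,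
    show ("eu":String).toList = ['e','u'] from rfl, show ("ie":String).toList = ['i','e'] from rfl,
    show ("oe":String).toList = ['o','e'] from rfl, show ("ou":String).toList = ['o','u'] from rfl,
    show ("ui":String).toList = ['u','i'] from rfl, hz]
  simp only [List.contains_eq_mem, List.mem_cons, List.not_mem_nil, or_false,
    decide_eq_true_eq]
  constructor
  · rintro (h | h | h | h | h | h | h | h | (h | h))
    all_goals first
      | exact ⟨_, h, by decide⟩
      | cases h
  · rintro ⟨ab, hmem, hab⟩
    rcases hab with rfl | rfl | rfl | rfl | rfl | rfl | rfl | rfl | rfl <;> tauto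

-- ===== VERDICT (by name: the statement is the Claim_ definition above) =====
theorem main_eq (words : List String) : check_feature_sixth words = check_feature_sixth_alt words := by
  induction words with
  | nil => rfl
  | cons w rest ih =>
    simp only [check_feature_sixth, check_feature_sixth_alt]
    have h := word_eq (PySem.Chars.lower w.toList)
    have hbridge : ∀ cv : String, PySem.Str.isIn cv (PySem.Str.lower w) =
        PySem.Chars.isIn cv.toList (PySem.Chars.lower w.toList) := by
      intro cv
      simp [PySem.Str.isIn]
    simp only [hbridge, h]
    split <;> [rfl; exact ih]

theorem check_feature_sixth_spec : Claim_equal_check_feature_sixth := by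
  intro words _
  exact main_eq words
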